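-- pv_equiv track=rewrite | github.com/synvo-ai/local-cocoa-service | app/services/chunker/semantic.py | _find_table_ranges
-- ===== SOURCE A (Python) =====
-- from typing import List, Tuple, Optional
--
-- def _find_table_ranges(text: str) -> List[Tuple[int, int]]:
--     """
--     Find markdown table ranges in text.
--     Tables start with a row containing | and continue until non-table lines.
--     """
--     ranges: List[Tuple[int, int]] = []
--     lines = text.split('\n')
--
--     in_table = False
--     table_start = 0
--     current_pos = 0
--
--     for i, line in enumerate(lines):
--         line_stripped = line.strip()
--         is_table_row = line_stripped.startswith('|') and '|' in line_stripped[1:]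
--         is_separator = '---' in line_stripped and '|' in line_stripped
--
--         if is_table_row or (in_table and is_separator):
--             if not in_table:
--                 table_start = current_pos
--                 in_table = True
--         else:
--             if in_table:
--                 # End of table
--                 ranges.append((table_start, current_pos))
--                 in_table = False
--
--         current_pos += len(line) + 1  # +1 for newline
--
--     # Handle table at end of text
--     if in_table:
--         ranges.append((table_start, len(text)))
--
--     return ranges
-- ===== SOURCE B (Python) =====
-- def _find_table_ranges(text):
--     lines = text.split('\n')
--
--     # pass 1a: character offset at which each line starts (one extra sentinel entry)
--     offsets = [0]
--     for line in lines:
--         offsets.append(offsets[-1] + len(line) + 1)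
--
--     # pass 1b: classify each line: is it part of a table?
--     member = []
--     inside = False
--     for line in lines:
--         s = line.strip()
--         inside = (s.startswith('|') and '|' in s[1:]) or (inside and '---' in s and '|' in s)
--         member.append(inside)
--
--     # pass 2: extract maximal runs of table lines as character ranges
--     starts = offsets[:-1]
--     ends = offsets[1:-1] + [len(text)]
--     items = list(zip(member, starts, ends))
--     ranges = []
--     k = 0
--     while k < len(items):
--         m, start, end = items[k]
--         if m:
--             while k + 1 < len(items) and items[k + 1][0]:
--                 end = items[k + 1][2]
--                 k += 1
--             ranges.append((start, end))
--         k += 1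
--     return ranges
-- ===== Notes on version B (the rewrite author's own statement) =====
-- stated objective: alternative
-- what changed: A's single stateful loop (in_table/table_start/current_pos threaded together) is split into three independent passes: a prefix-sum pass computing each line's starting character offset, a classification pass producing a per-line table-membership list, and a run-extraction pass that turns maximal runs of member lines into character ranges.
import Mathlib
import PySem

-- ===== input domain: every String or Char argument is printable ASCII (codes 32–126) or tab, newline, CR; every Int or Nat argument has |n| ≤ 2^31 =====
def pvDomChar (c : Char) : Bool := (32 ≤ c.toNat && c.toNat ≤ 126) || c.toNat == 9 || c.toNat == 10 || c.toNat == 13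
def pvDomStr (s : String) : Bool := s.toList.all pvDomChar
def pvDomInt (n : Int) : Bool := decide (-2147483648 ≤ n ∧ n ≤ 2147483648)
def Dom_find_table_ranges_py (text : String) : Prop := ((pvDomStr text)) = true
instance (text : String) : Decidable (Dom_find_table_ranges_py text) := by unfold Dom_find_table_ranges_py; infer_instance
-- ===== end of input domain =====

-- B replaces A's single stateful loop by three separate passes (line-start offsets, a per-line
-- membership list, maximal-run extraction); objective: alternative decomposition, same cost.


-- ===== PORT A =====
-- one iteration of A's for-loop; state = (ranges, in_table, table_start, current_pos)
def pvAStep (st : List (Int × Int) × Bool × Int × Int) (line : String) :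
    List (Int × Int) × Bool × Int × Int :=
  let line_stripped := PySem.Str.strip line
  let is_table_row := PySem.Str.startswith line_stripped "|" &&
    PySem.Str.isIn "|" (PySem.Str.slice line_stripped (some 1) none)
  let is_separator := PySem.Str.isIn "---" line_stripped && PySem.Str.isIn "|" line_stripped
  match st with
  | (ranges, in_table, table_start, current_pos) =>
    if is_table_row || (in_table && is_separator) then
      (ranges, true, (if in_table then table_start else current_pos),
        current_pos + (PySem.Str.len line : Int) + 1)
    else
      ((if in_table then ranges ++ [(table_start, current_pos)] else ranges), false, table_start,
        current_pos + (PySem.Str.len line : Int) + 1)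

def find_table_ranges_py (text : String) : List (Int × Int) :=
  -- text.split('\n'): split? is always `some` for this non-empty separator; getD only discharges the Option
  let lines := (PySem.Str.split? text "\n").getD []
  let fin := lines.foldl pvAStep ([], false, 0, 0)
  -- handle table at end of text
  if fin.2.1 then fin.1 ++ [(fin.2.2.1, (PySem.Str.len text : Int))] else fin.1

-- ===== PORT B =====
-- pass 1a of Source B: offsets = [0]; for line: offsets.append(offsets[-1] + len(line) + 1)
def pvOffsets (pos : Int) : List String → List Int
  | [] => [pos]
  | l :: ls => pos :: pvOffsets (pos + (PySem.Str.len l : Int) + 1) ls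

-- pass 1b of Source B: the per-line membership flags (state `inside` threaded through)
def pvMember (inside : Bool) : List String → List Bool
  | [] => []
  | l :: ls =>
    let s := PySem.Str.strip l
    let f := (PySem.Str.startswith s "|" && PySem.Str.isIn "|" (PySem.Str.slice s (some 1) none))
      || (inside && PySem.Str.isIn "---" s && PySem.Str.isIn "|" s)
    f :: pvMember f ls

-- pass 2 of Source B: the outer while loop (pvRuns) and its inner run-extending while loop (pvExtend)
mutual
def pvRuns : List (Bool × Int × Int) → List (Int × Int)
  | [] => []
  | (false, _, _) :: rest => pvRuns rest
  | (true, s, e) :: rest => pvExtend rest s e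
def pvExtend : List (Bool × Int × Int) → Int → Int → List (Int × Int)
  | [], s, e => [(s, e)]
  | (false, _, _) :: rest, s, e => (s, e) :: pvRuns rest
  | (true, _, e') :: rest, s, _ => pvExtend rest s e'
end

def find_table_ranges_py_alt (text : String) : List (Int × Int) :=
  let lines := (PySem.Str.split? text "\n").getD []
  let offsets := pvOffsets 0 lines
  let member := pvMember false lines
  let starts := PySem.List.slice offsets none (some (-1))
  let ends := PySem.List.slice offsets (some 1) (some (-1)) ++ [(PySem.Str.len text : Int)]
  pvRuns (member.zip (starts.zip ends))

-- ===== PRECONDITION & SPEC =====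
def Spec_find_table_ranges_py (text : String) (out : List (Int × Int)) : Prop := out = find_table_ranges_py_alt text
instance (text : String) (out : List (Int × Int)) : Decidable (Spec_find_table_ranges_py text out) := by unfold Spec_find_table_ranges_py; infer_instance

-- ===== CLAIM (what is proved, stated in full; the proofs are below) =====
def Claim_equal_find_table_ranges_py : Prop := ∀ (text : String), Dom_find_table_ranges_py text → Spec_find_table_ranges_py text (find_table_ranges_py text)

-- ===== LEMMAS AND PROOFS =====

-- the membership flag of one line given the incoming in-table state (A's loop condition)
def pvFlag (inside : Bool) (line : String) : Bool :=
  let s := PySem.Str.strip line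
  (PySem.Str.startswith s "|" && PySem.Str.isIn "|" (PySem.Str.slice s (some 1) none))
    || (inside && (PySem.Str.isIn "---" s && PySem.Str.isIn "|" s))

-- abstract item list: (flag, start offset, end offset) per line; the last line's end is L
def pvItems (L : Int) (inside : Bool) (pos : Int) : List String → List (Bool × Int × Int)
  | [] => []
  | l :: ls =>
    (pvFlag inside l, pos, if ls.isEmpty then L else pos + (PySem.Str.len l : Int) + 1) ::
      pvItems L (pvFlag inside l) (pos + (PySem.Str.len l : Int) + 1) ls

theorem pvMember_cons (inside : Bool) (l : String) (ls : List String) :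
    pvMember inside (l :: ls) = pvFlag inside l :: pvMember (pvFlag inside l) ls := by
  simp [pvMember, pvFlag, Bool.and_assoc]

theorem pvOffsets_ne_nil (pos : Int) (ls : List String) : pvOffsets pos ls ≠ [] := by
  cases ls <;> simp [pvOffsets]

-- bridge: B's zip of member/starts/ends lists is the abstract item list
theorem pvZip_eq_items (L : Int) (lines : List String) : ∀ (inside : Bool) (pos : Int),
    (pvMember inside lines).zip
      (((pvOffsets pos lines).dropLast).zip ((pvOffsets pos lines).tail.dropLast ++ [L]))
      = pvItems L inside pos lines := by
  induction lines with
  | nil => intro inside pos; simp [pvMember, pvOffsets, pvItems]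
  | cons l ls ih =>
    intro inside pos
    rw [pvMember_cons]
    cases ls with
    | nil => simp [pvMember, pvOffsets, pvItems]
    | cons l2 ls2 =>
      have h2 := pvOffsets_ne_nil (pos + (PySem.Str.len l : Int) + 1 + (PySem.Str.len l2 : Int) + 1) ls2
      simp only [pvOffsets, pvItems]
      cases h3 : pvOffsets (pos + (PySem.Str.len l : Int) + 1 + (PySem.Str.len l2 : Int) + 1) ls2 with
      | nil => exact absurd h3 h2
      | cons o os =>
        have := ih (pvFlag inside l) (pos + (PySem.Str.len l : Int) + 1)
        simp only [pvOffsets, h3] at this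
        simp only [List.dropLast_cons₂, List.tail_cons, List.cons_append, List.zip_cons_cons,
          List.isEmpty_cons] at this ⊢
        rw [this]
        simp [pvItems]

-- A's finalization ('handle table at end of text')
def pvAFin (L : Int) (st : List (Int × Int) × Bool × Int × Int) : List (Int × Int) :=
  if st.2.1 then st.1 ++ [(st.2.2.1, L)] else st.1

theorem pvAStep_eq (st : List (Int × Int) × Bool × Int × Int) (line : String) :
    pvAStep st line =
      if pvFlag st.2.1 line then
        (st.1, true, (if st.2.1 then st.2.2.1 else st.2.2.2), st.2.2.2 + (PySem.Str.len line : Int) + 1)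
      else
        ((if st.2.1 then st.1 ++ [(st.2.2.1, st.2.2.2)] else st.1), false, st.2.2.1,
          st.2.2.2 + (PySem.Str.len line : Int) + 1) := by
  obtain ⟨r, b, s, p⟩ := st
  simp [pvAStep, pvFlag]

-- main invariant: A's loop plus finalization = run extraction over the abstract item list
theorem pvMain (L : Int) (lines : List String) :
    ∀ (acc : List (Int × Int)) (inside : Bool) (start pos : Int),
    pvAFin L (lines.foldl pvAStep (acc, inside, start, pos))
      = acc ++ (if inside then
          pvExtend (pvItems L true pos lines) start (if lines.isEmpty then L else pos)
        else pvRuns (pvItems L false pos lines)) := by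
  induction lines with
  | nil =>
    intro acc inside start pos
    cases inside <;> simp [pvAFin, pvItems, pvRuns, pvExtend]
  | cons l ls ih =>
    intro acc inside start pos
    simp only [List.foldl_cons, pvAStep_eq]
    cases hf : pvFlag inside l with
    | true =>
      rw [if_pos rfl, ih]
      cases inside <;> simp [pvItems, hf, pvRuns, pvExtend]
    | false =>
      rw [if_neg (by simp), ih]
      cases inside <;> simp [pvItems, hf, pvRuns, pvExtend, List.append_assoc]

theorem pvSlice_one_neg_one (x : Int) (xs : List Int) :
    PySem.List.slice (x :: xs) (some 1) (some (-1)) = xs.dropLast := by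
  have h : ¬((xs.length : Int) < 0) := by omega
  simp [PySem.List.slice, PySem.List.clampIdx, List.dropLast_eq_take, h]

-- ===== VERDICT (by name: the statement is the Claim_ definition above) =====
theorem find_table_ranges_py_spec : Claim_equal_find_table_ranges_py := by
  intro text _
  unfold Spec_find_table_ranges_py find_table_ranges_py find_table_ranges_py_alt
  have hsplit : PySem.Str.split? text "\n"
      = some ((PySem.Chars.splitOn text.toList ['\n']).map String.ofList) := by
    simp [PySem.Str.split?, PySem.Chars.split?]
  rw [hsplit]
  simp only [Option.getD_some]
  generalize (PySem.Chars.splitOn text.toList ['\n']).map String.ofList = lines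
  have hmain := pvMain (PySem.Str.len text : Int) lines [] false 0 0
  simp only [pvAFin, Bool.false_eq_true, if_false, List.nil_append] at hmain
  have hb : pvRuns ((pvMember false lines).zip
      ((PySem.List.slice (pvOffsets 0 lines) none (some (-1))).zip
        (PySem.List.slice (pvOffsets 0 lines) (some 1) (some (-1)) ++ [(PySem.Str.len text : Int)])))
      = pvRuns (pvItems (PySem.Str.len text : Int) false 0 lines) := by
    have hoff : ∃ o os, pvOffsets 0 lines = o :: os := by
      cases lines <;> exact ⟨_, _, rfl⟩
    obtain ⟨o, os, ho⟩ := hoff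
    have hz := pvZip_eq_items (PySem.Str.len text : Int) lines false 0
    rw [ho] at hz ⊢
    simp only [List.tail_cons] at hz
    rw [PySem.List.slice_to_neg_one, pvSlice_one_neg_one, hz]
  rw [hb, ← hmain]
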